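-- pv_equiv track=rewrite | github.com/mattdinhnguyen/algos | contiguousSubArrays.py | bruteforce_solution
-- ===== SOURCE A (Python) =====
-- def bruteforce_solution(arr): #O(N^2)
--     # Starts from each index,
--     # expand towards both directions looking for a larger element.
--     n = len(arr)
--     result = [1] * n
--     st = []
--     for i, x in enumerate(arr):
--         for di in [1, -1]:
--             step = 1
--             while 0 <= i+ di*step < n and  arr[i+ di*step] < x:
--                 result[i] += 1
--                 step += 1
--
--     return result
-- ===== SOURCE B (Python) =====
-- def bruteforce_solution(arr):
--     # O(n) two-pass pointer-jumping: nearest >= neighbor on each side.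
--     def runs(a):
--         n = len(a)
--         nxt = [0] * n
--         for i in range(n - 1, -1, -1):
--             j = i + 1
--             while j < n and a[j] < a[i]:
--                 j = nxt[j]
--             nxt[i] = j
--         return [nxt[i] - i - 1 for i in range(n)]
--     R = runs(arr)
--     L = runs(arr[::-1])[::-1]
--     return [1 + L[i] + R[i] for i in range(len(arr))]
-- ===== Notes on version B (the rewrite author's own statement) =====
-- stated objective: faster
-- what changed: Replaces the per-index two-directional linear scans with two pointer-jumping passes that compute the nearest greater-or-equal boundary on each side, then assembles each count from the two boundaries.
import Mathlib
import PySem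

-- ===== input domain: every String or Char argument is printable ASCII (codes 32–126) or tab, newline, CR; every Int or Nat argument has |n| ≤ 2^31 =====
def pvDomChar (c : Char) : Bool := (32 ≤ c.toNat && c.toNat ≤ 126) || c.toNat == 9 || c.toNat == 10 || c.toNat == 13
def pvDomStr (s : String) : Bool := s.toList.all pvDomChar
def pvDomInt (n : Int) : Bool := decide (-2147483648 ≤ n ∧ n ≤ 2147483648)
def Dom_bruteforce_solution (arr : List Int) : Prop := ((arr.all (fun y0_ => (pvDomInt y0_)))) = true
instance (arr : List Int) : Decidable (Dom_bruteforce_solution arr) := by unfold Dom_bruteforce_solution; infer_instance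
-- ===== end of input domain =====

-- B replaces A's per-index bidirectional scans by two O(n) pointer-jumping passes
-- (nearest greater-or-equal boundary on each side); equivalence of return values is proved.

-- ===== PORT A =====
-- the inner 'while' loop of A; fuel (n+1) always suffices since step only grows
def whileA (arr : List Int) (x i di step : Int) (result : List Int) : Nat → List Int
  | 0 => result
  | fuel+1 =>
    if 0 ≤ i + di * step ∧ i + di * step < (arr.length : Int) ∧ arr.getD (i + di * step).toNat 0 < x
    then whileA arr x i di (step + 1) (result.set i.toNat (result.getD i.toNat 0 + 1)) fuel
    else result

def bruteforce_solution (arr : List Int) : List Int :=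
  let n := arr.length
  (PySem.List.enumerate arr).foldl
    (fun result p =>
      (([1, -1] : List Int)).foldl (fun result di => whileA arr p.2 p.1 di 1 result (n + 1)) result)
    (List.replicate n (1 : Int))

-- ===== PORT B =====
-- the inner 'while j < n and a[j] < a[i]: j = nxt[j]' loop; fuel (n+1) always suffices since j only grows
def jumpB (arr nxt : List Int) (x : Int) (j : Int) : Nat → Int
  | 0 => j
  | fuel+1 =>
    if j < (arr.length : Int) ∧ arr.getD j.toNat 0 < x
    then jumpB arr nxt x (nxt.getD j.toNat 0) fuel
    else j

-- 'for i in range(n-1, -1, -1): ... nxt[i] = j' as a count-down recursion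
def buildNxt (arr : List Int) : Nat → List Int → List Int
  | 0, nxt => nxt
  | i+1, nxt => buildNxt arr i (nxt.set i (jumpB arr nxt (arr.getD i 0) ((i : Int) + 1) (arr.length + 1)))

def runsB (arr : List Int) : List Int :=
  let n := arr.length
  let nxt := buildNxt arr n (List.replicate n (0 : Int))
  (List.range n).map (fun i => nxt.getD i 0 - (i : Int) - 1)

def bruteforce_solution_alt (arr : List Int) : List Int :=
  let R := runsB arr
  let L := (runsB arr.reverse).reverse
  (List.range arr.length).map (fun i => 1 + L.getD i 0 + R.getD i 0)

-- ===== PRECONDITION & SPEC =====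
def Spec_bruteforce_solution (arr : List Int) (out : List Int) : Prop := out = bruteforce_solution_alt arr
instance (arr : List Int) (out : List Int) : Decidable (Spec_bruteforce_solution arr out) := by unfold Spec_bruteforce_solution; infer_instance

-- ===== CLAIM (what is proved, stated in full; the proofs are below) =====
def Claim_equal_bruteforce_solution : Prop := ∀ (arr : List Int), Dom_bruteforce_solution arr → Spec_bruteforce_solution arr (bruteforce_solution arr)

-- ===== LEMMAS AND PROOFS =====

-- length of the maximal <x prefix to the right of i / to the left of i
def rlen (arr : List Int) (i : Nat) : Nat :=
  ((arr.drop (i+1)).takeWhile (fun y => decide (y < arr.getD i 0))).length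
def llen (arr : List Int) (i : Nat) : Nat :=
  ((arr.take i).reverse.takeWhile (fun y => decide (y < arr.getD i 0))).length
-- index of the first element ≥ arr[i] to the right (arr.length if none)
def Fge (arr : List Int) (i : Nat) : Nat := i + 1 + rlen arr i

lemma setSelf (l : List Int) (n : Nat) : l.set n (l.getD n 0) = l := by
  induction l generalizing n with
  | nil => simp
  | cons a l ih =>
    cases n with
    | zero => simp [List.getD]
    | succ m => simpa [List.getD_eq_getElem?_getD] using ih m

lemma getD_set_self (l : List Int) (n : Nat) (a : Int) (h : n < l.length) :
    (l.set n a).getD n 0 = a := by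
  simp [List.getD_eq_getElem?_getD, List.getElem?_set_self h]

lemma getD_set_ne (l : List Int) (n m : Nat) (a : Int) (h : n ≠ m) :
    (l.set n a).getD m 0 = l.getD m 0 := by
  simp [List.getD_eq_getElem?_getD, List.getElem?_set_ne h]

lemma getD_drop (l : List Int) (a m : Nat) : (l.drop a).getD m 0 = l.getD (a + m) 0 := by
  simp [List.getD_eq_getElem?_getD, List.getElem?_drop]

lemma tw_sound (p : Int → Bool) (l : List Int) (m : Nat) (h : m < (l.takeWhile p).length) :
    p (l.getD m 0) = true := by
  induction l generalizing m with
  | nil => simp [List.takeWhile] at h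
  | cons a l ih =>
    by_cases hp : p a
    · cases m with
      | zero => simpa [List.getD]
      | succ m' =>
        rw [List.takeWhile_cons_of_pos hp] at h
        simpa [List.getD_cons_succ] using ih m' (by simpa using h)
    · simp [List.takeWhile_cons_of_neg hp] at h

lemma tw_unique (p : Int → Bool) (l : List Int) (k : Nat)
    (h1 : ∀ m, m < k → p (l.getD m 0) = true)
    (h2 : k < l.length → p (l.getD k 0) = false) (hk : k ≤ l.length) :
    (l.takeWhile p).length = k := by
  induction l generalizing k with
  | nil => simpa using (hk.antisymm (by simp)).symm
  | cons a l ih =>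
    cases k with
    | zero =>
      have hpa : ¬ p a = true := by
        have := h2 (by simp)
        simp [List.getD] at this
        simp [this]
      simp [List.takeWhile_cons_of_neg hpa]
    | succ k' =>
      have hp : p a = true := by simpa [List.getD] using h1 0 (Nat.succ_pos k')
      rw [List.takeWhile_cons_of_pos hp]
      simp only [List.length_cons, Nat.add_left_inj]
      exact ih k' (fun m hm => by simpa [List.getD_cons_succ] using h1 (m+1) (by omega))
        (fun hk' => by simpa [List.getD_cons_succ] using h2 (by simpa using Nat.succ_lt_succ hk'))
        (by simpa using Nat.succ_le_succ hk)

lemma F_le (arr : List Int) (i : Nat) (hi : i < arr.length) : Fge arr i ≤ arr.length := by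
  have h := ((arr.drop (i+1)).takeWhile_prefix (fun y => decide (y < arr.getD i 0))).length_le
  unfold Fge rlen
  simp only [List.length_drop] at h
  omega

lemma F_all_lt (arr : List Int) (i m : Nat) (h1 : i < m) (h2 : m < Fge arr i) :
    arr.getD m 0 < arr.getD i 0 := by
  have hm : m - (i+1) < rlen arr i := by unfold Fge at h2; omega
  have h := tw_sound _ _ _ hm
  rw [getD_drop] at h
  have hmi : i + 1 + (m - (i+1)) = m := by omega
  rw [hmi] at h
  simpa using h

lemma F_unique (arr : List Int) (i j : Nat) (hi : i < arr.length) (h1 : i < j)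
    (h2 : j ≤ arr.length)
    (hall : ∀ m, i < m → m < j → arr.getD m 0 < arr.getD i 0)
    (hstop : j < arr.length → ¬ arr.getD j 0 < arr.getD i 0) :
    Fge arr i = j := by
  have hk : j - (i+1) ≤ (arr.drop (i+1)).length := by simp only [List.length_drop]; omega
  have h1' : ∀ m, m < j - (i+1) →
      (fun y => decide (y < arr.getD i 0)) ((arr.drop (i+1)).getD m 0) = true := by
    intro m hm
    rw [getD_drop]
    simpa using hall (i+1+m) (by omega) (by omega)
  have h2' : j - (i+1) < (arr.drop (i+1)).length →
      (fun y => decide (y < arr.getD i 0)) ((arr.drop (i+1)).getD (j - (i+1)) 0) = false := by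
    intro hlt
    rw [getD_drop]
    have hj : j < arr.length := by simp only [List.length_drop] at hlt; omega
    have hji : i+1+(j-(i+1)) = j := by omega
    rw [hji]
    simpa using hstop hj
  have := tw_unique (fun y => decide (y < arr.getD i 0)) _ _ h1' h2' hk
  unfold Fge rlen
  omega

-- jumpB correctness given correct nxt entries above i
lemma jump_correct (arr nxt : List Int) (i : Nat) (hi : i < arr.length)
    (hn : ∀ k, i < k → k < arr.length → nxt.getD k 0 = (Fge arr k : Int)) :
    ∀ fuel (j : Nat), i < j → j ≤ arr.length →
      (∀ m, i < m → m < j → arr.getD m 0 < arr.getD i 0) →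
      arr.length + 1 ≤ j + fuel →
      jumpB arr nxt (arr.getD i 0) (j : Int) fuel = (Fge arr i : Int) := by
  intro fuel
  induction fuel with
  | zero => intro j hij hjn hall hfuel; omega
  | succ fuel ih =>
    intro j hij hjn hall hfuel
    by_cases hjlt : j < arr.length
    · by_cases hx : arr.getD j 0 < arr.getD i 0
      · have hcond : ((j : Int) < (arr.length : Int) ∧ arr.getD ((j : Int)).toNat 0 < arr.getD i 0) := by
          refine ⟨by exact_mod_cast hjlt, by simpa using hx⟩
        rw [jumpB, if_pos hcond]
        have hnj : nxt.getD ((j : Int)).toNat 0 = ((Fge arr j : Nat) : Int) := by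
          simpa using hn j hij hjlt
        rw [hnj]
        refine ih (Fge arr j) (by unfold Fge; omega) (F_le arr j hjlt) ?_ (by unfold Fge at *; omega)
        intro m h1 h2
        rcases Nat.lt_trichotomy m j with hmj | hmj | hmj
        · exact hall m h1 hmj
        · subst hmj; exact hx
        · exact lt_trans (F_all_lt arr j m hmj h2) hx
      · rw [jumpB, if_neg (by push Not; intro _; simpa using hx)]
        exact_mod_cast congrArg (fun n : Nat => (n : Int))
          (F_unique arr i j hi hij hjn hall (fun _ => hx)).symm
    · have hj : j = arr.length := by omega
      rw [jumpB, if_neg (by push Not; intro h1; exact absurd (by exact_mod_cast h1) hjlt)]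
      exact_mod_cast congrArg (fun n : Nat => (n : Int))
        (F_unique arr i j hi hij hjn hall (fun h => absurd h hjlt)).symm

lemma build_correct (arr : List Int) :
    ∀ (i : Nat) (nxt : List Int), nxt.length = arr.length → i ≤ arr.length →
      (∀ k, i ≤ k → k < arr.length → nxt.getD k 0 = (Fge arr k : Int)) →
      (buildNxt arr i nxt).length = arr.length ∧
      ∀ k, k < arr.length → (buildNxt arr i nxt).getD k 0 = (Fge arr k : Int) := by
  intro i
  induction i with
  | zero =>
    intro nxt hlen hle hinv
    exact ⟨by simpa [buildNxt] using hlen, fun k hk => by simpa [buildNxt] using hinv k (Nat.zero_le k) hk⟩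
  | succ i ih =>
    intro nxt hlen hle hinv
    simp only [buildNxt]
    apply ih
    · simp [hlen]
    · omega
    · intro k hk hkn
      by_cases hki : k = i
      · subst hki
        rw [getD_set_self _ _ _ (by omega)]
        have hj := jump_correct arr nxt k (by omega)
          (fun k' h1 h2 => hinv k' (by omega) h2)
          (arr.length + 1) (k + 1) (by omega) (by omega)
          (fun m h1 h2 => absurd h2 (by omega)) (by omega)
        push_cast at hj
        exact hj
      · rw [getD_set_ne _ _ _ _ (fun h => hki h.symm)]
        exact hinv k (by omega) hkn

lemma runsB_getD (arr : List Int) (i : Nat) (hi : i < arr.length) :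
    (runsB arr).getD i 0 = (rlen arr i : Int) := by
  have hb := (build_correct arr arr.length (List.replicate arr.length 0)
    (by simp) (le_refl _) (fun k hk hkn => absurd hkn (by omega))).2 i hi
  simp only [runsB, List.getD_eq_getElem?_getD, List.getElem?_map, List.getElem?_range hi]
  simp only [List.getD_eq_getElem?_getD] at hb
  simp [hb, Fge]
  ring

lemma runsB_length (arr : List Int) : (runsB arr).length = arr.length := by
  simp [runsB]

lemma rlen_reverse (arr : List Int) (i : Nat) (hi : i < arr.length) :
    rlen arr.reverse (arr.length - 1 - i) = llen arr i := by
  unfold rlen llen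
  have h1 : arr.reverse.drop (arr.length - 1 - i + 1) = (arr.take i).reverse := by
    rw [List.drop_reverse, show arr.length - (arr.length - 1 - i + 1) = i by omega]
  have h2 : arr.reverse.getD (arr.length - 1 - i) 0 = arr.getD i 0 := by
    have hlt : arr.length - 1 - i < arr.length := by omega
    simp only [List.getD_eq_getElem?_getD, List.getElem?_reverse hlt,
      show arr.length - 1 - (arr.length - 1 - i) = i by omega]
  rw [h1, h2]

lemma drop_cons_getD (arr : List Int) (t : Nat) (ht : t < arr.length) :
    arr.drop t = arr.getD t 0 :: arr.drop (t+1) := by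
  rw [List.drop_eq_getElem_cons ht]
  congr 1
  simp [List.getD_eq_getElem?_getD, List.getElem?_eq_getElem ht]

lemma take_succ_getD (arr : List Int) (t : Nat) (ht : t < arr.length) :
    arr.take (t+1) = arr.take t ++ [arr.getD t 0] := by
  rw [List.take_add_one]
  congr 1
  simp [List.getD_eq_getElem?_getD, List.getElem?_eq_getElem ht]

lemma whileA_right (arr : List Int) (i : Nat) (hi : i < arr.length) :
    ∀ (fuel : Nat) (step : Int) (result : List Int), 1 ≤ step →
      (arr.length : Int) ≤ (i : Int) + step + (fuel : Int) →
      whileA arr (arr.getD i 0) (i : Int) 1 step result fuel =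
        result.set i (result.getD i 0 +
          (((arr.drop ((i : Int) + step).toNat).takeWhile (fun y => decide (y < arr.getD i 0))).length : Int)) := by
  intro fuel
  induction fuel with
  | zero =>
    intro step result hs hf
    have hdrop : arr.drop ((i : Int) + step).toNat = [] := List.drop_eq_nil_of_le (by omega)
    simp only [whileA, hdrop, List.takeWhile_nil, List.length_nil, Nat.cast_zero, add_zero, setSelf]
  | succ fuel ih =>
    intro step result hs hf
    rw [whileA]
    by_cases hin : (i : Int) + 1 * step < (arr.length : Int)
    · have ht : ((i : Int) + 1 * step).toNat < arr.length := by omega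
      by_cases hx : arr.getD ((i : Int) + 1 * step).toNat 0 < arr.getD i 0
      · rw [if_pos ⟨by omega, hin, hx⟩]
        rw [ih (step + 1) _ (by omega) (by push_cast at hf ⊢; omega)]
        have hidx : ((i : Int) + (step + 1)).toNat = ((i : Int) + step).toNat + 1 := by omega
        have hone : ((i : Int) + 1 * step).toNat = ((i : Int) + step).toNat := by omega
        rw [hidx, drop_cons_getD arr ((i : Int) + step).toNat (by omega),
          List.takeWhile_cons_of_pos (by simp only [hone] at hx; simpa using hx),
          List.length_cons]
        by_cases hir : i < result.length
        · rw [Int.toNat_natCast, getD_set_self _ _ _ hir, List.set_set]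
          congr 1
          push_cast
          ring
        · rw [Int.toNat_natCast,
            List.set_eq_of_length_le (by first | omega | (simp only [List.length_set]; omega)), List.set_eq_of_length_le (by first | omega | (simp only [List.length_set]; omega)),
            List.set_eq_of_length_le (by first | omega | (simp only [List.length_set]; omega))]
      · rw [if_neg (fun h => hx h.2.2)]
        have hone : ((i : Int) + 1 * step).toNat = ((i : Int) + step).toNat := by omega
        rw [hone] at hx ht
        rw [drop_cons_getD arr ((i : Int) + step).toNat ht,
          List.takeWhile_cons_of_neg (by simpa using hx)]
        simp only [List.length_nil, Nat.cast_zero, add_zero, setSelf]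
    · rw [if_neg (fun h => hin h.2.1)]
      have hdrop : arr.drop ((i : Int) + step).toNat = [] := List.drop_eq_nil_of_le (by omega)
      rw [hdrop]
      simp only [List.takeWhile_nil, List.length_nil, Nat.cast_zero, add_zero, setSelf]

lemma whileA_left (arr : List Int) (i : Nat) (hi : i < arr.length) :
    ∀ (fuel : Nat) (step : Int) (result : List Int), 1 ≤ step →
      (i : Int) + 1 ≤ step + (fuel : Int) →
      whileA arr (arr.getD i 0) (i : Int) (-1) step result fuel =
        result.set i (result.getD i 0 +
          (((arr.take ((i : Int) + 1 - step).toNat).reverse.takeWhile (fun y => decide (y < arr.getD i 0))).length : Int)) := by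
  intro fuel
  induction fuel with
  | zero =>
    intro step result hs hf
    have h0 : ((i : Int) + 1 - step).toNat = 0 := by omega
    simp only [whileA, h0, List.take_zero, List.reverse_nil, List.takeWhile_nil,
      List.length_nil, Nat.cast_zero, add_zero, setSelf]
  | succ fuel ih =>
    intro step result hs hf
    rw [whileA]
    by_cases hin : (0 : Int) ≤ (i : Int) + (-1) * step
    · have ht : ((i : Int) + (-1) * step).toNat < arr.length := by omega
      by_cases hx : arr.getD ((i : Int) + (-1) * step).toNat 0 < arr.getD i 0
      · rw [if_pos ⟨hin, by omega, hx⟩]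
        rw [ih (step + 1) _ (by omega) (by push_cast at hf ⊢; omega)]
        have h2 : ((i : Int) + 1 - (step + 1)).toNat = ((i : Int) + (-1) * step).toNat := by omega
        have h1 : ((i : Int) + 1 - step).toNat = ((i : Int) + (-1) * step).toNat + 1 := by omega
        rw [h2, h1, take_succ_getD arr _ ht, List.reverse_append, List.reverse_singleton,
          List.singleton_append, List.takeWhile_cons_of_pos (by simpa using hx),
          List.length_cons]
        by_cases hir : i < result.length
        · rw [Int.toNat_natCast, getD_set_self _ _ _ hir, List.set_set]
          congr 1
          push_cast
          ring
        · rw [Int.toNat_natCast,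
            List.set_eq_of_length_le (by first | omega | (simp only [List.length_set]; omega)), List.set_eq_of_length_le (by first | omega | (simp only [List.length_set]; omega)),
            List.set_eq_of_length_le (by first | omega | (simp only [List.length_set]; omega))]
      · rw [if_neg (fun h => hx h.2.2)]
        have h1 : ((i : Int) + 1 - step).toNat = ((i : Int) + (-1) * step).toNat + 1 := by omega
        rw [h1, take_succ_getD arr _ ht, List.reverse_append, List.reverse_singleton,
          List.singleton_append, List.takeWhile_cons_of_neg (by simpa using hx)]
        simp only [List.length_nil, Nat.cast_zero, add_zero, setSelf]
    · rw [if_neg (fun h => hin h.1)]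
      have h0 : ((i : Int) + 1 - step).toNat = 0 := by omega
      rw [h0]
      simp only [List.take_zero, List.reverse_nil, List.takeWhile_nil, List.length_nil,
        Nat.cast_zero, add_zero, setSelf]

lemma foldA (arr : List Int) :
    ∀ (m k : Nat) (result : List Int), arr.length - k = m → result.length = arr.length →
      (∀ t, k ≤ t → t < arr.length → result.getD t 0 = 1) →
      let out := (PySem.List.enumerate (arr.drop k) (k : Int)).foldl
        (fun result p =>
          (([1, -1] : List Int)).foldl (fun result di => whileA arr p.2 p.1 di 1 result (arr.length + 1)) result)
        result
      out.length = arr.length ∧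
      ∀ t, t < arr.length →
        out.getD t 0 = if t < k then result.getD t 0 else 1 + (rlen arr t : Int) + (llen arr t : Int) := by
  intro m
  induction m with
  | zero =>
    intro k result hm hlen hone
    have hk : arr.length ≤ k := by omega
    rw [List.drop_eq_nil_of_le hk, PySem.List.enumerate_nil]
    refine ⟨by simpa using hlen, fun t ht => ?_⟩
    rw [if_pos (by omega)]
    rfl
  | succ m ih =>
    intro k result hm hlen hone
    have hk : k < arr.length := by omega
    rw [drop_cons_getD arr k hk, PySem.List.enumerate_cons]
    simp only [List.foldl_cons, List.foldl_nil]
    rw [whileA_right arr k hk (arr.length + 1) 1 result (by omega) (by push_cast; omega)]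
    have h1 : ((k : Int) + 1).toNat = k + 1 := by omega
    rw [h1]
    have hkr : k < result.length := by omega
    rw [whileA_left arr k hk (arr.length + 1) 1 _ (by omega) (by push_cast; omega)]
    have h2 : ((k : Int) + 1 - 1).toNat = k := by omega
    rw [h2, getD_set_self _ _ _ hkr, List.set_set, hone k (le_refl k) hk]
    have hcast : (k : Int) + 1 = ((k + 1 : Nat) : Int) := by push_cast; ring
    rw [hcast]
    have hres2 : (result.set k (1 + (rlen arr k : Int) + (llen arr k : Int))).length = arr.length := by
      simp [hlen]
    have := ih (k + 1) (result.set k (1 + (rlen arr k : Int) + (llen arr k : Int)))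
      (by omega) hres2
      (fun t ht htn => by
        rw [getD_set_ne _ _ _ _ (by omega)]
        exact hone t (by omega) htn)
    simp only [List.foldl_cons, List.foldl_nil] at this
    have hrl : (List.takeWhile (fun y => decide (y < arr.getD k 0)) (List.drop (k + 1) arr)).length = rlen arr k := rfl
    have hll : (List.takeWhile (fun y => decide (y < arr.getD k 0)) (List.take k arr).reverse).length = llen arr k := rfl
    rw [hrl, hll]
    refine ⟨this.1, fun t ht => ?_⟩
    rw [this.2 t ht]
    rcases Nat.lt_trichotomy t k with htk | htk | htk
    · rw [if_pos (by omega), if_pos htk, getD_set_ne _ _ _ _ (by omega)]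
    · subst htk
      rw [if_pos (by omega), if_neg (by omega), getD_set_self _ _ _ hkr]
    · rw [if_neg (by omega), if_neg (by omega)]

lemma A_eq (arr : List Int) :
    bruteforce_solution arr =
      (List.range arr.length).map (fun i => 1 + (rlen arr i : Int) + (llen arr i : Int)) := by
  have h := foldA arr arr.length 0 (List.replicate arr.length (1 : Int)) (by omega)
    (by simp) (fun t _ ht => by simp [List.getD_eq_getElem?_getD, ht])
  simp only [List.drop_zero, Nat.cast_zero] at h
  apply List.ext_getElem
  · simpa [bruteforce_solution] using h.1
  · intro t h1 h2
    have ht : t < arr.length := by simpa using h2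
    have hval := h.2 t ht
    rw [if_neg (by omega)] at hval
    simp only [List.getElem_map, List.getElem_range]
    rw [← List.getD_eq_getElem _ 0 h1]
    simpa [bruteforce_solution] using hval

lemma B_eq (arr : List Int) :
    bruteforce_solution_alt arr =
      (List.range arr.length).map (fun i => 1 + (rlen arr i : Int) + (llen arr i : Int)) := by
  simp only [bruteforce_solution_alt]
  apply List.ext_getElem
  · simp
  · intro t h1 h2
    have ht : t < arr.length := by simpa using h2
    simp only [List.getElem_map, List.getElem_range]
    have hLlen : t < (runsB arr.reverse).length := by rw [runsB_length]; simpa using ht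
    have hL : ((runsB arr.reverse).reverse).getD t 0 = (llen arr t : Int) := by
      rw [List.getD_eq_getElem?_getD, List.getElem?_reverse hLlen, ← List.getD_eq_getElem?_getD]
      have hidx : (runsB arr.reverse).length - 1 - t = arr.length - 1 - t := by
        rw [runsB_length]; simp
      rw [hidx, runsB_getD arr.reverse (arr.length - 1 - t) (by simp; omega),
        rlen_reverse arr t ht]
    rw [hL, runsB_getD arr t ht]
    push_cast
    ring

-- ===== VERDICT (by name: the statement is the Claim_ definition above) =====
theorem bruteforce_solution_spec : Claim_equal_bruteforce_solution := by
  intro arr _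
  unfold Spec_bruteforce_solution
  rw [A_eq, B_eq]
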